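-- pv_equiv track=rewrite | github.com/JamieM0/uaw | routines/assemble.py | process_breadcrumbs
-- ===== SOURCE A (Python) =====
-- def process_breadcrumbs(breadcrumbs_str):
--     """Process breadcrumbs string into a list of dictionaries with names and URLs."""
--     if not breadcrumbs_str:
--         return []
--
--     parts = [part for part in breadcrumbs_str.strip('/').split('/') if part]
--     result = []
--     current_path = ""
--
--     # Add Home breadcrumb
--     result.append({'name': 'Home', 'url': '/'})
--
--     for i, part in enumerate(parts):
--         # Build cumulative path, ensuring no double slashes
--         current_path = f"{current_path}/{part}".replace('//', '/')
--         display_name = part.replace('-', ' ').title()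
--
--         # Determine URL
--         url = f"{current_path}/" if i < len(parts) - 1 else None
--
--         result.append({
--             'name': display_name,
--             'url': url
--         })
--
--     return result
-- ===== SOURCE B (Python) =====
-- def process_breadcrumbs(breadcrumbs_str):
--     """Process breadcrumbs string into a list of dictionaries with names and URLs."""
--     if not breadcrumbs_str:
--         return []
--     parts = [part for part in breadcrumbs_str.strip('/').split('/') if part]
--     n = len(parts)
--     return [{'name': 'Home', 'url': '/'}] + [
--         {'name': part.replace('-', ' ').title(),
--          'url': '/' + '/'.join(parts[:i + 1]) + '/' if i < n - 1 else None}
--         for i, part in enumerate(parts)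
--     ]
-- ===== Notes on version B (the rewrite author's own statement) =====
-- stated objective: simpler
-- what changed: Replaces the running current_path accumulator and its double-slash cleanup replace by a single list comprehension that computes each URL directly as a slash-joined prefix slice of parts.
import Mathlib
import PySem

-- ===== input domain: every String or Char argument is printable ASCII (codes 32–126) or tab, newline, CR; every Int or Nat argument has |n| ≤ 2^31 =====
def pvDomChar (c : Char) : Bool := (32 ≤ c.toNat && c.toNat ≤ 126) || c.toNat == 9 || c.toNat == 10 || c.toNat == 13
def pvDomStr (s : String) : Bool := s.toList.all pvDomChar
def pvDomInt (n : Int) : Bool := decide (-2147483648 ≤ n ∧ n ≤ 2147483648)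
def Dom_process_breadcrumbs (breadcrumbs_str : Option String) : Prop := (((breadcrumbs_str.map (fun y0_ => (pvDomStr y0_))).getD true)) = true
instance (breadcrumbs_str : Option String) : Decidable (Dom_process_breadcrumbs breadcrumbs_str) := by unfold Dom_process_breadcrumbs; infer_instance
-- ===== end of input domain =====

-- B replaces A's running current_path accumulator (and its double-slash cleanup replace) by a single
-- comprehension that computes each URL directly from a slash-joined prefix slice of parts; same value everywhere.

-- str.title() ported by hand (shared by both ports, both Pythons call it): exact on the ASCII domain,
-- where a word is a maximal run of letters; first letter uppercased, the rest lowercased.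
def titleGo : List Char → Bool → List Char
  | [], _ => []
  | c :: rest, prevAlpha =>
    if c.isAlpha then (if prevAlpha then c.toLower else c.toUpper) :: titleGo rest true
    else c :: titleGo rest false

-- ===== PORT A =====
def process_breadcrumbs (breadcrumbs_str : Option String) : List (List (String × Option String)) :=
  match breadcrumbs_str with
  | none => []
  | some s =>
    if s = "" then []
    else
      let parts : List (List Char) :=
        (PySem.Chars.splitOn (PySem.Chars.stripChars s.toList ['/']) ['/']).filter (fun p => p ≠ [])
      let n : Int := (parts.length : Int)
      (List.foldl
        (fun (st : List (List (String × Option String)) × List Char) (ip : Int × List Char) =>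
          let current_path := PySem.Chars.replace (st.2 ++ '/' :: ip.2) ['/', '/'] ['/']
          let display_name := titleGo (PySem.Chars.replace ip.2 ['-'] [' ']) false
          let url : Option String :=
            if ip.1 < n - 1 then some (String.mk (current_path ++ ['/'])) else none
          (st.1 ++ [[("name", some (String.mk display_name)), ("url", url)]], current_path))
        ([[("name", some "Home"), ("url", some "/")]], [])
        (PySem.List.enumerate parts)).1

-- ===== PORT B =====
def process_breadcrumbs_alt (breadcrumbs_str : Option String) : List (List (String × Option String)) :=
  match breadcrumbs_str with
  | none => []
  | some s =>
    if s = "" then []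
    else
      let parts : List (List Char) :=
        (PySem.Chars.splitOn (PySem.Chars.stripChars s.toList ['/']) ['/']).filter (fun p => p ≠ [])
      let n : Int := (parts.length : Int)
      [[("name", some "Home"), ("url", some "/")]] ++
        (PySem.List.enumerate parts).map (fun ip =>
          [("name", some (String.mk (titleGo (PySem.Chars.replace ip.2 ['-'] [' ']) false))),
           ("url", if ip.1 < n - 1 then
              some (String.mk ('/' :: PySem.Chars.join ['/'] (PySem.List.slice parts none (some (ip.1 + 1))) ++ ['/']))
            else none)])

-- ===== PRECONDITION & SPEC =====
def Spec_process_breadcrumbs (breadcrumbs_str : Option String) (out : List (List (String × Option String))) : Prop := out = process_breadcrumbs_alt breadcrumbs_str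
instance (breadcrumbs_str : Option String) (out : List (List (String × Option String))) : Decidable (Spec_process_breadcrumbs breadcrumbs_str out) := by unfold Spec_process_breadcrumbs; infer_instance

-- ===== CLAIM (what is proved, stated in full; the proofs are below) =====
def Claim_equal_process_breadcrumbs : Prop := ∀ (breadcrumbs_str : Option String), Dom_process_breadcrumbs breadcrumbs_str → Spec_process_breadcrumbs breadcrumbs_str (process_breadcrumbs breadcrumbs_str)

-- ===== LEMMAS AND PROOFS =====

-- '/p1/p2/.../pk' as a list of chars
def pathOf (ps : List (List Char)) : List Char := ps.flatMap (fun p => '/' :: p)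

theorem pathOf_append (xs : List (List Char)) (p : List Char) :
    pathOf (xs ++ [p]) = pathOf xs ++ '/' :: p := by
  simp [pathOf]

-- no "//" occurs in p ++ pathOf ps when p is slash-free and all parts are nonempty and slash-free
theorem no_dbl : ∀ (ps : List (List Char)), (∀ q ∈ ps, q ≠ [] ∧ '/' ∉ q) →
    ∀ (p : List Char), '/' ∉ p → ¬ (['/', '/'] <:+: (p ++ pathOf ps)) := by
  intro ps
  induction ps with
  | nil =>
    intro _ p
    induction p with
    | nil => intro _ h; simp [pathOf] at h
    | cons c p' ih =>
      intro hp h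
      rcases List.infix_cons_iff.mp h with hpre | hinf
      · rcases List.cons_prefix_cons.mp hpre with ⟨rfl, _⟩
        exact hp (List.mem_cons_self)
      · exact ih (fun hm => hp (List.mem_cons_of_mem _ hm)) hinf
  | cons q qs ihqs =>
    intro hgood p
    have hq := hgood q (List.mem_cons_self)
    have hqs : ∀ r ∈ qs, r ≠ [] ∧ '/' ∉ r := fun r hr => hgood r (List.mem_cons_of_mem _ hr)
    induction p with
    | nil =>
      intro _ h
      have : pathOf (q :: qs) = '/' :: (q ++ pathOf qs) := by simp [pathOf]
      rw [List.nil_append, this] at h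
      rcases List.infix_cons_iff.mp h with hpre | hinf
      · rcases List.cons_prefix_cons.mp hpre with ⟨_, hpre2⟩
        cases hq1 : q with
        | nil => exact hq.1 hq1
        | cons c q' =>
          rw [hq1] at hpre2
          rcases List.cons_prefix_cons.mp hpre2 with ⟨hc, _⟩
          exact hq.2 (by rw [hq1]; exact hc ▸ List.mem_cons_self)
      · exact ihqs hqs q hq.2 hinf
    | cons c p' ih =>
      intro hp h
      rcases List.infix_cons_iff.mp h with hpre | hinf
      · rcases List.cons_prefix_cons.mp hpre with ⟨rfl, _⟩
        exact hp (List.mem_cons_self)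
      · exact ih (fun hm => hp (List.mem_cons_of_mem _ hm)) hinf

theorem replace_go_noop : ∀ (fuel : Nat) (l acc old new : List Char), old ≠ [] → ¬ (old <:+: l) →
    PySem.Chars.replace.go old new fuel l acc = acc.reverse ++ l := by
  intro fuel
  induction fuel with
  | zero => intro l acc old new _ _; rfl
  | succ fuel ih =>
    intro l acc old new hne hni
    cases l with
    | nil => simp [PySem.Chars.replace.go]
    | cons c t =>
      have hnp : old.isPrefixOf (c :: t) = false := by
        by_contra hcon
        exact hni ((List.isPrefixOf_iff_prefix.mp (by revert hcon; cases old.isPrefixOf (c :: t) <;> simp)).isInfix)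
      have hni' : ¬ (old <:+: t) := fun h => hni (h.trans (List.suffix_cons c t).isInfix)
      show PySem.Chars.replace.go old new (fuel + 1) (c :: t) acc = acc.reverse ++ c :: t
      rw [PySem.Chars.replace.go, hnp]
      simp only [Bool.false_eq_true, if_false]
      rw [ih t (c :: acc) old new hne hni']
      simp

theorem replace_noop (l old new : List Char) (hne : old ≠ []) (hni : ¬ (old <:+: l)) :
    PySem.Chars.replace l old new = l := by
  rw [PySem.Chars.replace]
  simp only [List.isEmpty_iff, hne, if_false]
  rw [replace_go_noop l.length l [] old new hne hni]
  rfl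

theorem splitOn_go_no_slash :
    ∀ (fuel : Nat) (l cur : List Char) (acc : List (List Char)), l.length < fuel →
      '/' ∉ cur → (∀ q ∈ acc, '/' ∉ q) →
      ∀ q ∈ PySem.Chars.splitOn.go ['/'] fuel l cur acc, '/' ∉ q := by
  intro fuel
  induction fuel with
  | zero => intro l cur acc h; omega
  | succ fuel ih =>
    intro l cur acc hlen hcur hacc
    cases l with
    | nil =>
      intro q hq
      rw [PySem.Chars.splitOn.go] at hq
      · simp only [List.reverse_cons, List.mem_append, List.mem_reverse, List.mem_singleton] at hq
        rcases hq with hq | rfl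
        · exact hacc q hq
        · simp only [List.mem_reverse]; exact hcur
      · omega
    | cons c rest =>
      rw [PySem.Chars.splitOn.go]
      by_cases hpre : List.isPrefixOf ['/'] (c :: rest) = true
      · rw [hpre]
        simp only [if_true]
        apply ih
        · simp at hlen ⊢; omega
        · simp
        · intro q hq
          rcases List.mem_cons.mp hq with rfl | hq
          · simp only [List.mem_reverse]; exact hcur
          · exact hacc q hq
      · rw [Bool.not_eq_true] at hpre
        rw [hpre]
        simp only [Bool.false_eq_true, if_false]
        apply ih
        · simpa using Nat.lt_of_succ_lt_succ hlen
        · intro hm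
          rcases List.mem_cons.mp hm with rfl | hm
          · simp [List.isPrefixOf] at hpre
          · exact hcur hm
        · exact hacc

theorem splitOn_no_slash (cs : List Char) : ∀ q ∈ PySem.Chars.splitOn cs ['/'], '/' ∉ q := by
  rw [PySem.Chars.splitOn]
  exact splitOn_go_no_slash (cs.length + 1) cs [] [] (by omega) (by simp) (by simp)

-- the common per-element entry, phrased over take
def entryOf (parts : List (List Char)) (ip : Int × List Char) : List (String × Option String) :=
  [("name", some (String.mk (titleGo (PySem.Chars.replace ip.2 ['-'] [' ']) false))),
   ("url", if ip.1 < (parts.length : Int) - 1 then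
      some (String.mk (pathOf (List.take (ip.1.toNat + 1) parts) ++ ['/'])) else none)]

theorem pathOf_eq_intercalate : ∀ (ls : List (List Char)) (p : List Char),
    pathOf (p :: ls) = '/' :: List.intercalate ['/'] (p :: ls) := by
  intro ls
  induction ls with
  | nil => intro p; simp [pathOf, List.intercalate]
  | cons q qs ih =>
    intro p
    have h1 : pathOf (p :: q :: qs) = '/' :: p ++ pathOf (q :: qs) := by simp [pathOf]
    have h2 : List.intercalate ['/'] (p :: q :: qs) = p ++ '/' :: List.intercalate ['/'] (q :: qs) := by
      simp [List.intercalate]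
    rw [h1, h2, ih q]
    simp

theorem loopA (parts : List (List Char)) (hgood : ∀ q ∈ parts, q ≠ [] ∧ '/' ∉ q) :
    ∀ (rest pre : List (List Char)) (res : List (List (String × Option String))),
      pre ++ rest = parts →
      List.foldl
        (fun (st : List (List (String × Option String)) × List Char) (ip : Int × List Char) =>
          let current_path := PySem.Chars.replace (st.2 ++ '/' :: ip.2) ['/', '/'] ['/']
          let display_name := titleGo (PySem.Chars.replace ip.2 ['-'] [' ']) false
          let url : Option String :=
            if ip.1 < (parts.length : Int) - 1 then some (String.mk (current_path ++ ['/'])) else none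
          (st.1 ++ [[("name", some (String.mk display_name)), ("url", url)]], current_path))
        (res, pathOf pre)
        (PySem.List.enumerate rest (pre.length : Int)) =
      (res ++ (PySem.List.enumerate rest (pre.length : Int)).map (entryOf parts), pathOf parts) := by
  intro rest
  induction rest with
  | nil =>
    intro pre res hpre
    simp only [PySem.List.enumerate_nil, List.foldl_nil, List.map_nil, List.append_nil]
    rw [List.append_nil] at hpre
    rw [hpre]
  | cons p rest' ih =>
    intro pre res hpre
    have hmem : ∀ q ∈ pre ++ [p], q ≠ [] ∧ '/' ∉ q := by
      intro q hq
      apply hgood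
      rw [← hpre]
      rcases List.mem_append.mp hq with h | h
      · exact List.mem_append.mpr (Or.inl h)
      · simp at h; subst h; exact List.mem_append.mpr (Or.inr List.mem_cons_self)
    have hrepl : PySem.Chars.replace (pathOf pre ++ '/' :: p) ['/', '/'] ['/'] = pathOf pre ++ '/' :: p := by
      apply replace_noop _ _ _ (by simp)
      rw [← pathOf_append]
      have := no_dbl (pre ++ [p]) hmem [] (by simp)
      simpa using this
    have htake : List.take (pre.length + 1) parts = pre ++ [p] := by
      rw [← hpre, List.take_append]
      simp
    rw [PySem.List.enumerate_cons, List.foldl_cons]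
    simp only
    rw [hrepl]
    have hcast : (pre.length : Int) + 1 = ((pre ++ [p]).length : Int) := by simp
    have hpath : pathOf pre ++ '/' :: p = pathOf (pre ++ [p]) := (pathOf_append pre p).symm
    rw [hpath, hcast, ih (pre ++ [p]) _ (by simpa using hpre)]
    refine Prod.ext ?_ rfl
    simp only [List.map_cons, ← hcast, entryOf, Int.toNat_natCast, htake,
      List.append_assoc, List.singleton_append]

theorem b_entry (parts : List (List Char)) (ip : Int × List Char)
    (hmem : ip ∈ PySem.List.enumerate parts) :
    [(("name" : String), some (String.mk (titleGo (PySem.Chars.replace ip.2 ['-'] [' ']) false))),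
     ("url", if ip.1 < (parts.length : Int) - 1 then
        some (String.mk ('/' :: PySem.Chars.join ['/'] (PySem.List.slice parts none (some (ip.1 + 1))) ++ ['/']))
      else none)] = entryOf parts ip := by
  rcases (PySem.List.mem_enumerate_iff parts 0 ip).mp hmem with ⟨k, hk, rfl⟩
  simp only [entryOf, zero_add, Int.toNat_natCast]
  by_cases hlt : (k : Int) < (parts.length : Int) - 1
  · rw [if_pos hlt, if_pos hlt]
    congr 1
    have hslice : PySem.List.slice parts none (some ((k : Int) + 1)) = List.take (k + 1) parts := by
      rw [PySem.List.slice_to parts (by omega : (0 : Int) ≤ (k : Int) + 1)]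
      norm_num
    rw [hslice]
    cases htk : List.take (k + 1) parts with
    | nil =>
      exfalso
      have : (List.take (k + 1) parts).length = min (k + 1) parts.length := List.length_take
      rw [htk] at this
      simp at this
      omega
    | cons q qs =>
      rw [pathOf_eq_intercalate qs q]
      rfl
  · rw [if_neg hlt, if_neg hlt]

-- ===== VERDICT (by name: the statement is the Claim_ definition above) =====
set_option maxHeartbeats 1000000 in
theorem process_breadcrumbs_spec : Claim_equal_process_breadcrumbs := by
  intro bs _
  unfold Spec_process_breadcrumbs
  cases bs with
  | none => rfl
  | some s =>
    by_cases hs : s = ""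
    · simp [process_breadcrumbs, process_breadcrumbs_alt, hs]
    · rw [process_breadcrumbs, process_breadcrumbs_alt]
      simp only [hs, if_false]
      set parts : List (List Char) :=
        (PySem.Chars.splitOn (PySem.Chars.stripChars s.toList ['/']) ['/']).filter (fun p => p ≠ []) with hparts
      have hgood : ∀ q ∈ parts, q ≠ [] ∧ '/' ∉ q := by
        intro q hq
        rw [hparts, List.mem_filter] at hq
        refine ⟨by simpa using hq.2, ?_⟩
        intro hm
        exact splitOn_no_slash _ q hq.1 hm
      have hloop := loopA parts hgood parts [] [[("name", some "Home"), ("url", some "/")]] (by simp)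
      simp only [pathOf, List.flatMap_nil, List.length_nil, Nat.cast_zero] at hloop
      rw [hloop]
      exact congrArg (fun m => [[("name", some "Home"), ("url", some "/")]] ++ m)
        (List.map_congr_left (fun ip hip => (b_entry parts ip hip).symm))
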